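-- pv_equiv track=rewrite | github.com/Nobody-1321/Cheese | cheese/ordenar_puntos.py | ordenar_puntos
-- ===== SOURCE A (Python) =====
-- def ordenar_puntos(puntos):
--     puntos_ordenados_x = sorted(puntos, key=lambda punto: (punto[1], punto[0]))
--
--     puntos_interseccion_ordenados2 = []
--
--     #ordenar solo en y
--     for i in range(0, len(puntos_ordenados_x), 9):
--         fila = puntos_ordenados_x[i:i+9]  # Seleccionar 9 puntos
--         fila_ordenada = sorted(fila, key=lambda punto: punto[0])  # Ordenar por la coordenada x
--         puntos_interseccion_ordenados2.extend(fila_ordenada)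
--
--     return puntos_interseccion_ordenados2
-- ===== SOURCE B (Python) =====
-- def ordenar_puntos(puntos):
--     xy = sorted(puntos, key=lambda p: (p[1], p[0]))
--     return [p for _, p in sorted(enumerate(xy), key=lambda q: (q[0] // 9, q[1][0]))]
-- ===== Notes on version B (the rewrite author's own statement) =====
-- stated objective: alternative
-- what changed: Replaced A's explicit step-9 loop that slices each row of 9 and re-sorts it by x with accumulator extends by a single stable global sort of the enumerated y-sorted list under the composite key (index // 9, x), relying on sort stability to reproduce per-chunk tie order.
import Mathlib
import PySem

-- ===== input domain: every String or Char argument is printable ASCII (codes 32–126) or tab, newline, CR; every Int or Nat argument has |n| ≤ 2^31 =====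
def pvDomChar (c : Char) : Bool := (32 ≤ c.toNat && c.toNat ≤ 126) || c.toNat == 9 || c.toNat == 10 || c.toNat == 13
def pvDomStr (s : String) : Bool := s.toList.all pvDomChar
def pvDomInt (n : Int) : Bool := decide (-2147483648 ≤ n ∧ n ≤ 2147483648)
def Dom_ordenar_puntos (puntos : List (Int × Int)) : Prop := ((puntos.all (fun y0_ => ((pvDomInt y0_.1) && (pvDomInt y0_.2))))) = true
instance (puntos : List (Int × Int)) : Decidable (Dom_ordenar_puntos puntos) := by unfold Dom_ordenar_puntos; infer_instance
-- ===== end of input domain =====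

-- B replaces A's step-9 chunk loop (slice + per-row sort + extend) by one global stable sort of the
-- enumerated y-sorted list under the composite key (index // 9, x); objective: alternative decomposition.


-- ===== PORT A =====
def ordenar_puntos (puntos : List (Int × Int)) : List (Int × Int) :=
  let puntos_ordenados_x := PySem.List.sorted2 puntos (fun punto => punto.2) (fun punto => punto.1)
  (PySem.List.pyRange 0 (puntos_ordenados_x.length : Int) 9).foldl
    (fun acc i =>
      acc ++ PySem.List.sorted (PySem.List.slice puntos_ordenados_x (some i) (some (i + 9)))
               (fun punto => punto.1)) []

-- ===== PORT B =====
def ordenar_puntos_alt (puntos : List (Int × Int)) : List (Int × Int) :=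
  let xy := PySem.List.sorted2 puntos (fun p => p.2) (fun p => p.1)
  (PySem.List.sorted2 (PySem.List.enumerate xy 0)
      (fun q => PySem.Int.floordiv q.1 9) (fun q => q.2.1)).map (fun q => q.2)

-- ===== PRECONDITION & SPEC =====
def Spec_ordenar_puntos (puntos : List (Int × Int)) (out : List (Int × Int)) : Prop := out = ordenar_puntos_alt puntos
instance (puntos : List (Int × Int)) (out : List (Int × Int)) : Decidable (Spec_ordenar_puntos puntos out) := by unfold Spec_ordenar_puntos; infer_instance

-- ===== CLAIM (what is proved, stated in full; the proofs are below) =====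
def Claim_equal_ordenar_puntos : Prop := ∀ (puntos : List (Int × Int)), Dom_ordenar_puntos puntos → Spec_ordenar_puntos puntos (ordenar_puntos puntos)

-- ===== LEMMAS AND PROOFS =====

-- comparison functions of B's two sorts (definitionally the ones PySem.List.sorted2 / sorted build)
def pvB1 : (Int × Int) → (Int × Int) → Bool := fun a b => decide (a.1 < b.1)
def pvB2 : (Int × (Int × Int)) → (Int × (Int × Int)) → Bool := fun a b =>
  decide (PySem.Int.floordiv a.1 9 < PySem.Int.floordiv b.1 9)
    || (!decide (PySem.Int.floordiv b.1 9 < PySem.Int.floordiv a.1 9) && decide (a.2.1 < b.2.1))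

-- common normal form of both programs: sort each chunk of 9 by x, front to back
def chunkSort : List (Int × Int) → List (Int × Int)
  | [] => []
  | x :: xs => PySem.List.sorted (List.take 9 (x :: xs)) (fun p => p.1) ++ chunkSort (List.drop 9 (x :: xs))
termination_by l => l.length
decreasing_by simp only [List.length_drop, List.length_cons]; omega

-- generic facts about PySem's insertion sort fold
lemma pv_ins_skip {α : Type} (before : α → α → Bool) (x : α) (S T : List α)
    (h : ∀ a ∈ S, before x a = false) :
    PySem.List.insertBy before x (S ++ T) = S ++ PySem.List.insertBy before x T := by
  induction S with
  | nil => simp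
  | cons a S ih =>
    have ha : before x a = false := h a (by simp)
    simp [PySem.List.insertBy, ha, ih (fun b hb => h b (by simp [hb]))]

lemma pv_mem_foldl_ins {α : Type} (before : α → α → Bool) (L : List α) :
    ∀ (acc : List α) (y : α), y ∈ L.foldl (fun acc x => PySem.List.insertBy before x acc) acc → y ∈ acc ∨ y ∈ L := by
  induction L with
  | nil => intro acc y h; exact Or.inl (by simpa using h)
  | cons b L ih =>
    intro acc y h
    rcases ih (PySem.List.insertBy before b acc) y (by simpa using h) with h' | h'
    · rcases (PySem.List.mem_insertBy before b y acc).1 h' with rfl | h''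
      · exact Or.inr (by simp)
      · exact Or.inl h''
    · exact Or.inr (by simp [h'])

lemma pv_foldl_ins_append {α : Type} (before : α → α → Bool) (L : List α) :
    ∀ (S T : List α), (∀ b ∈ L, ∀ a ∈ S, before b a = false) →
    L.foldl (fun acc x => PySem.List.insertBy before x acc) (S ++ T)
      = S ++ L.foldl (fun acc x => PySem.List.insertBy before x acc) T := by
  induction L with
  | nil => intro S T _; simp
  | cons b L ih =>
    intro S T h
    simp only [List.foldl_cons]
    rw [pv_ins_skip before b S T (h b (by simp)), ih S _ (fun c hc a ha => h c (by simp [hc]) a ha)]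

lemma pv_sortedF_append {α : Type} (before : α → α → Bool) (A B : List α)
    (h : ∀ b ∈ B, ∀ a ∈ A, before b a = false) :
    (A ++ B).foldl (fun acc x => PySem.List.insertBy before x acc) []
      = A.foldl (fun acc x => PySem.List.insertBy before x acc) []
        ++ B.foldl (fun acc x => PySem.List.insertBy before x acc) [] := by
  rw [List.foldl_append]
  have hmem : ∀ b ∈ B, ∀ a ∈ A.foldl (fun acc x => PySem.List.insertBy before x acc) [], before b a = false := by
    intro b hb a ha
    rcases pv_mem_foldl_ins before A [] a ha with h' | h'
    · simp at h'
    · exact h b hb a h'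
  have := pv_foldl_ins_append before B (A.foldl (fun acc x => PySem.List.insertBy before x acc) []) [] hmem
  simpa using this

lemma pv_map_insertBy {α β : Type} (before' : α → α → Bool) (before : β → β → Bool) (f : α → β) (x : α) (ys : List α)
    (h : ∀ y ∈ ys, before' x y = before (f x) (f y)) :
    (PySem.List.insertBy before' x ys).map f = PySem.List.insertBy before (f x) (ys.map f) := by
  induction ys with
  | nil => simp [PySem.List.insertBy]
  | cons y ys ih =>
    have hy : before' x y = before (f x) (f y) := h y (by simp)
    by_cases hb : before' x y = true
    · simp [PySem.List.insertBy, hb, ← hy]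
    · have hb' : before' x y = false := by simpa using hb
      simp [PySem.List.insertBy, hb', ← hy, ih (fun z hz => h z (by simp [hz]))]

lemma pv_map_foldl_ins {α β : Type} (before' : α → α → Bool) (before : β → β → Bool) (f : α → β) (L : List α) :
    ∀ (acc : List α), (∀ p ∈ L, ∀ q : α, q ∈ acc ∨ q ∈ L → before' p q = before (f p) (f q)) →
    (L.foldl (fun acc x => PySem.List.insertBy before' x acc) acc).map f
      = (L.map f).foldl (fun acc y => PySem.List.insertBy before y acc) (acc.map f) := by
  induction L with
  | nil => intro acc _; simp
  | cons p L ih =>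
    intro acc h
    simp only [List.foldl_cons, List.map_cons]
    have h1 : ∀ r ∈ L, ∀ q : α, q ∈ PySem.List.insertBy before' p acc ∨ q ∈ L → before' r q = before (f r) (f q) := by
      intro r hr q hq
      apply h r (by simp [hr])
      rcases hq with hq | hq
      · rcases (PySem.List.mem_insertBy before' p q acc).1 hq with rfl | hq2
        · exact Or.inr (by simp)
        · exact Or.inl hq2
      · exact Or.inr (by simp [hq])
    have h2 : ∀ y ∈ acc, before' p y = before (f p) (f y) := fun y hy => h p (by simp) y (Or.inl hy)
    rw [ih (PySem.List.insertBy before' p acc) h1, pv_map_insertBy before' before f p acc h2]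

-- arithmetic of the chunk key
lemma pv_fd9 (m j : Nat) (hj : j < 9) :
    PySem.Int.floordiv (9 * (m:Int) + (j:Int)) 9 = (m:Int) := by
  rw [PySem.Int.floordiv_eq_iff_of_pos (by norm_num)]
  omega

lemma pv_fd9_lt (m k : Nat) : (m:Int) < PySem.Int.floordiv (9 * (m:Int) + 9 + (k:Int)) 9 := by
  have h := (PySem.Int.le_floordiv_iff_mul_le (a := 9 * (m:Int) + 9 + (k:Int)) (b := 9) (q := (m:Int) + 1) (by norm_num)).2 (by omega)
  omega

lemma pv_b2_false (a b : Int × (Int × Int)) (h : PySem.Int.floordiv a.1 9 < PySem.Int.floordiv b.1 9) :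
    pvB2 b a = false := by
  have h1 : ¬ (PySem.Int.floordiv b.1 9 < PySem.Int.floordiv a.1 9) := by omega
  simp only [pvB2, decide_eq_false h1, decide_eq_true h]
  simp

lemma pv_b2_chunk (a b : Int × (Int × Int)) (h : PySem.Int.floordiv a.1 9 = PySem.Int.floordiv b.1 9) :
    pvB2 a b = pvB1 a.2 b.2 := by
  simp only [pvB2, pvB1, h]
  simp

-- within one chunk (length ≤ 9, indices 9m..), B's composite-key sort projects to A's per-row sort by x
lemma pv_chunk_sort (c : List (Int × Int)) (m : Nat) (hc : c.length ≤ 9) :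
    (List.foldl (fun acc p => PySem.List.insertBy pvB2 p acc) [] (PySem.List.enumerate c (9*(m:Int)))).map (fun q => q.2)
    = PySem.List.sorted c (fun p => p.1) := by
  have hcond : ∀ p ∈ PySem.List.enumerate c (9*(m:Int)), ∀ q : Int × (Int × Int),
      q ∈ ([] : List (Int × (Int × Int))) ∨ q ∈ PySem.List.enumerate c (9*(m:Int)) →
      pvB2 p q = pvB1 ((fun q => q.2) p) ((fun q => q.2) q) := by
    intro p hp q hq
    rcases hq with hq | hq
    · simp at hq
    · rcases (PySem.List.mem_enumerate_iff c _ p).1 hp with ⟨j, hj, rfl⟩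
      rcases (PySem.List.mem_enumerate_iff c _ q).1 hq with ⟨k, hk, rfl⟩
      apply pv_b2_chunk
      dsimp only
      rw [pv_fd9 m j (by omega), pv_fd9 m k (by omega)]
  rw [pv_map_foldl_ins pvB2 pvB1 (fun q => q.2) (PySem.List.enumerate c (9*(m:Int))) [] hcond]
  rw [List.map_nil, PySem.List.map_snd_enumerate, PySem.List.sorted_eq_foldl_insertBy]
  rfl

-- B's global composite-key sort equals the chunk normal form
lemma pv_Bmain (xs : List (Int × Int)) : ∀ (m : Nat),
    (List.foldl (fun acc p => PySem.List.insertBy pvB2 p acc) [] (PySem.List.enumerate xs (9*(m:Int)))).map (fun q => q.2)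
    = chunkSort xs := by
  induction xs using chunkSort.induct with
  | case1 => intro m; simp [PySem.List.enumerate_nil, chunkSort]
  | case2 x xs ih =>
    intro m
    have hsplit : PySem.List.enumerate (x::xs) (9*(m:Int))
        = PySem.List.enumerate (List.take 9 (x::xs)) (9*(m:Int))
          ++ PySem.List.enumerate (List.drop 9 (x::xs)) ((9*(m:Int)) + ((List.take 9 (x::xs)).length : Int)) := by
      conv_lhs => rw [← List.take_append_drop 9 (x::xs)]
      rw [PySem.List.enumerate_append]
    have hcross : ∀ b ∈ PySem.List.enumerate (List.drop 9 (x::xs)) ((9*(m:Int)) + ((List.take 9 (x::xs)).length : Int)),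
        ∀ a ∈ PySem.List.enumerate (List.take 9 (x::xs)) (9*(m:Int)), pvB2 b a = false := by
      intro b hb a ha
      rcases (PySem.List.mem_enumerate_iff _ _ b).1 hb with ⟨k, hk, rfl⟩
      rcases (PySem.List.mem_enumerate_iff _ _ a).1 ha with ⟨j, hj, rfl⟩
      have h9 : 9 < (x::xs).length := by
        simp only [List.length_drop] at hk; omega
      have hlen9 : (List.take 9 (x::xs)).length = 9 := by
        simp only [List.length_take]; omega
      have hj9 : j < 9 := by
        simp only [List.length_take] at hj; omega
      have hb1 : (9*(m:Int) + ((List.take 9 (x::xs)).length : Int)) + (k:Int) = 9 * (m:Int) + 9 + (k:Int) := by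
        rw [hlen9]; push_cast; ring
      apply pv_b2_false
      dsimp only
      rw [pv_fd9 m j hj9, hb1]
      exact pv_fd9_lt m k
    rw [hsplit, pv_sortedF_append pvB2 _ _ hcross, List.map_append]
    by_cases hlen : (x::xs).length ≤ 9
    · have hdrop : List.drop 9 (x::xs) = [] := List.drop_eq_nil_iff.2 hlen
      rw [hdrop, PySem.List.enumerate_nil]
      simp only [List.foldl_nil, List.map_nil, List.append_nil]
      rw [pv_chunk_sort (List.take 9 (x::xs)) m (by simp only [List.length_take]; omega)]
      conv_rhs => rw [chunkSort]
      rw [hdrop]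
      simp [chunkSort]
    · have hlen9 : (List.take 9 (x::xs)).length = 9 := by
        simp only [List.length_take]; omega
      rw [pv_chunk_sort (List.take 9 (x::xs)) m (le_of_eq hlen9)]
      have hstart : (9*(m:Int)) + ((List.take 9 (x::xs)).length : Int) = 9 * (((m+1 : Nat)) : Int) := by
        rw [hlen9]; push_cast; ring
      rw [hstart, ih (m+1)]
      conv_rhs => rw [chunkSort]

-- A's step-9 range loop equals the chunk normal form
lemma pv_range_chunk (xs : List (Int × Int)) :
    (List.range ((xs.length + 8)/9)).flatMap
      (fun k => PySem.List.sorted (List.take 9 (List.drop (9*k) xs)) (fun p => p.1)) = chunkSort xs := by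
  induction xs using chunkSort.induct with
  | case1 => simp [chunkSort]
  | case2 x xs ih =>
    have hc : ((x::xs).length + 8)/9 = ((List.drop 9 (x::xs)).length + 8)/9 + 1 := by
      simp only [List.length_drop, List.length_cons]; omega
    rw [hc, List.range_succ_eq_map, List.flatMap_cons, List.flatMap_map]
    have hdr : ∀ k : Nat, List.drop (9 * Nat.succ k) (x::xs) = List.drop (9*k) (List.drop 9 (x::xs)) := by
      intro k; rw [List.drop_drop]; congr 1; omega
    simp only [hdr]
    rw [ih]
    conv_rhs => rw [chunkSort]
    norm_num

lemma pv_A_range (xs : List (Int × Int)) (cnt : Nat) (hcnt : cnt = (xs.length + 8)/9) :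
    (List.range cnt).foldl
      (fun acc (k : Nat) => acc ++ PySem.List.sorted (PySem.List.slice xs (some (0 + 9*(k:Int))) (some (0 + 9*(k:Int) + 9))) (fun p => p.1)) []
    = chunkSort xs := by
  subst hcnt
  have hsl : ∀ k : Nat, PySem.List.slice xs (some (0 + 9*(k:Int))) (some (0 + 9*(k:Int) + 9)) = List.take 9 (List.drop (9*k) xs) := by
    intro k
    have h1 : (0 + 9 * (k:Int)) = ((9*k : Nat) : Int) := by push_cast; ring
    rw [h1, show ((9*k : Nat) : Int) + 9 = ((9*k : Nat) : Int) + ((9:Nat) : Int) from by norm_num,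
      PySem.List.slice_natCast_add]
  simp only [hsl]
  rw [PySem.List.foldl_append_eq_flatMap, List.nil_append]
  exact pv_range_chunk xs

lemma pv_A_loop (xs : List (Int × Int)) :
    (PySem.List.pyRange 0 (xs.length : Int) 9).foldl
      (fun acc i => acc ++ PySem.List.sorted (PySem.List.slice xs (some i) (some (i + 9))) (fun p => p.1)) []
    = chunkSort xs := by
  rw [PySem.List.pyRange_of_pos 0 ((xs.length : Int)) (by norm_num), List.foldl_map]
  have hcnt : (if (0:Int) < (xs.length:Int) then (((xs.length:Int) - 0 + 9 - 1)/9).toNat else 0) = (xs.length + 8)/9 := by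
    split_ifs with h <;> omega
  exact pv_A_range xs _ hcnt

lemma pv_A_eq (puntos : List (Int × Int)) :
    ordenar_puntos puntos = chunkSort (PySem.List.sorted2 puntos (fun p => p.2) (fun p => p.1)) :=
  pv_A_loop _

lemma pv_B_eq (puntos : List (Int × Int)) :
    ordenar_puntos_alt puntos = chunkSort (PySem.List.sorted2 puntos (fun p => p.2) (fun p => p.1)) := by
  show (List.foldl (fun acc p => PySem.List.insertBy pvB2 p acc) []
      (PySem.List.enumerate (PySem.List.sorted2 puntos (fun p => p.2) (fun p => p.1)) 0)).map (fun q => q.2) = _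
  rw [show PySem.List.enumerate (PySem.List.sorted2 puntos (fun p => p.2) (fun p => p.1)) 0
      = PySem.List.enumerate (PySem.List.sorted2 puntos (fun p => p.2) (fun p => p.1)) (9 * ((0:Nat):Int)) from by norm_num]
  exact pv_Bmain _ 0

-- ===== VERDICT (by name: the statement is the Claim_ definition above) =====
theorem ordenar_puntos_spec : Claim_equal_ordenar_puntos := by
  intro puntos _
  unfold Spec_ordenar_puntos
  rw [pv_A_eq, pv_B_eq]
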